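-- pv_equiv track=rewrite | github.com/opethe1st/CompetitiveProgramming | CodeChef/2019/02/art_of_balance.py | minimum_op_to_be_balanced
-- ===== SOURCE A (Python) =====
-- def get_factors_less_than_26(num):
--     return [i for i in range(1, 27) if (num % i) == 0]
--
-- def minimum_op_to_be_balanced(string):
--     charToCount = {}
--     for letter in string:
--         charToCount[letter] = charToCount.get(letter, 0) + 1
--
--     counts = sorted(list(charToCount.values()), reverse=True)
--     minNumberOfOp = float('inf')
--     for factor in get_factors_less_than_26(num=len(string)):
--         num = len(string) // factor
--
--         currentMinNumberOfOp = 0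
--         for count in counts[:factor]:
--             # change only the ones that are greater, they will be converted to the ones that are less
--             if count > num:
--                 currentMinNumberOfOp += (count - num)
--
--         # need to convert the rest to the first factor characters
--         currentMinNumberOfOp += sum(counts[factor:])
--
--         if currentMinNumberOfOp < minNumberOfOp:
--             minNumberOfOp = currentMinNumberOfOp
--
--     return minNumberOfOp
-- ===== SOURCE B (Python) =====
-- def minimum_op_to_be_balanced(string):
--     n = len(string)
--     freq = {}
--     for ch in string:
--         freq[ch] = freq.get(ch, 0) + 1
--     counts = sorted(freq.values(), reverse=True)
--     prefix = [0]
--     for c in counts: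
--         prefix.append(prefix[-1] + c)
--     best = None
--     f = 1
--     while f <= 26:
--         if n % f == 0:
--             num = n // f
--             top = min(f, len(counts))
--             # binary search: first index in counts[:top] with counts[i] < num
--             lo, hi = 0, top
--             while lo < hi:
--                 mid = (lo + hi) // 2
--                 if counts[mid] >= num:
--                     lo = mid + 1
--                 else:
--                     hi = mid
--             kept = num * lo + (prefix[top] - prefix[lo])
--             cost = n - kept
--             if best is None or cost < best:
--                 best = cost
--         f += 1
--     return best
-- ===== Notes on version B (the rewrite author's own statement) =====
-- stated objective: alternative
-- what changed: Replaces A's per-divisor inner scans (surplus accumulation over counts[:factor] plus sum of counts[factor:]) with a prefix-sum array built once and a hand-rolled binary search that finds, per divisor, the boundary between counts capped at n//f and counts kept whole, so each divisor's cost is computed from three prefix-sum lookups; the running minimum becomes an explicit while-loop over f=1..26 with a None sentinel.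
import Mathlib
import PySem

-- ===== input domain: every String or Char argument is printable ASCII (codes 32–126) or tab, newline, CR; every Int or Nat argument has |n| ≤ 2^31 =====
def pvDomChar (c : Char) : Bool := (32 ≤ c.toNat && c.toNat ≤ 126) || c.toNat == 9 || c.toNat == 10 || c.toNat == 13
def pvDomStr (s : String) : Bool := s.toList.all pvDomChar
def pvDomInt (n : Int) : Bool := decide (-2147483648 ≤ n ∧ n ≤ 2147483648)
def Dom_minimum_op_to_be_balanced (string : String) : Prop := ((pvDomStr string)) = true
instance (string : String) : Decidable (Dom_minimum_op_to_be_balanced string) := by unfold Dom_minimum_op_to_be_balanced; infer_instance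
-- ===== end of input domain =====

-- B replaces A's per-divisor slice scans (surplus loop + tail sum) by prefix sums over the
-- sorted counts plus a hand-rolled binary search for the cap boundary (objective: alternative).

-- ===== PORT A =====
def get_factors_less_than_26 (num : Int) : List Int :=
  (PySem.List.pyRange 1 27 1).filter (fun i => PySem.Int.mod num i == 0)

def minimum_op_to_be_balanced (string : String) : Int :=
  let charToCount : PySem.Dict Char Int :=
    string.toList.foldl (fun d letter => d.insert letter (d.getD letter 0 + 1)) PySem.Dict.empty
  let counts : List Int := PySem.List.sorted charToCount.values (fun x => x) true
  -- float('inf') is modelled as `none`; factor 1 always divides len(string), so the loop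
  -- always replaces it and `.getD 0` is never the result.
  let result : Option Int :=
    (get_factors_less_than_26 (PySem.Str.len string)).foldl (fun minNumberOfOp factor =>
      let num := PySem.Int.floordiv (PySem.Str.len string) factor
      let cur := (PySem.List.slice counts none (some factor)).foldl
          (fun acc count => if count > num then acc + (count - num) else acc) 0
      let cur2 := cur + (PySem.List.slice counts (some factor) none).sum
      match minNumberOfOp with
      | none => some cur2
      | some m => if cur2 < m then some cur2 else some m) none
  result.getD 0

-- ===== PORT B =====
-- the `while lo < hi` binary search of Source B; counts[mid] is always in range there,
-- so the index is ported as getD (exact on every reachable input)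
def pvBsearch (counts : List Int) (num : Int) (lo hi : Nat) : Nat :=
  if _h : lo < hi then
    if num ≤ counts.getD ((lo + hi) / 2) 0 then
      pvBsearch counts num ((lo + hi) / 2 + 1) hi
    else
      pvBsearch counts num lo ((lo + hi) / 2)
  else lo
termination_by hi - lo
decreasing_by all_goals omega

-- the `while f <= 26` loop of Source B
def pvLoopB (n : Int) (counts prefixs : List Int) (f : Nat) (best : Option Int) : Option Int :=
  if f ≤ 26 then
    let best' :=
      if PySem.Int.mod n (f : Int) == 0 then
        let num := PySem.Int.floordiv n (f : Int)
        let top := min f counts.length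
        let lo := pvBsearch counts num 0 top
        let kept := num * (lo : Int) + (prefixs.getD top 0 - prefixs.getD lo 0)
        let cost := n - kept
        match best with
        | none => some cost
        | some b => if cost < b then some cost else some b
      else best
    pvLoopB n counts prefixs (f + 1) best'
  else best
termination_by 27 - f

def minimum_op_to_be_balanced_alt (string : String) : Int :=
  let n : Int := PySem.Str.len string
  let freq : PySem.Dict Char Int :=
    string.toList.foldl (fun d ch => d.insert ch (d.getD ch 0 + 1)) PySem.Dict.empty
  let counts : List Int := PySem.List.sorted freq.values (fun x => x) true
  let prefixs : List Int :=
    counts.foldl (fun p c => p ++ [(PySem.List.pyGet? p (-1)).getD 0 + c]) [0]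
  -- Source B returns `best`, which is never None (f = 1 always divides); `.getD 0` is never the result
  (pvLoopB n counts prefixs 1 none).getD 0

-- ===== PRECONDITION & SPEC =====
def Spec_minimum_op_to_be_balanced (string : String) (out : Int) : Prop := out = minimum_op_to_be_balanced_alt string
instance (string : String) (out : Int) : Decidable (Spec_minimum_op_to_be_balanced string out) := by unfold Spec_minimum_op_to_be_balanced; infer_instance

-- ===== CLAIM (what is proved, stated in full; the proofs are below) =====
def Claim_equal_minimum_op_to_be_balanced : Prop := ∀ (string : String), Dom_minimum_op_to_be_balanced string → Spec_minimum_op_to_be_balanced string (minimum_op_to_be_balanced string)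

-- ===== LEMMAS AND PROOFS =====

-- the running-minimum step both loops use (None = not yet set)
def pvMStep (acc : Option Int) (c : Int) : Option Int :=
  match acc with
  | none => some c
  | some m => if c < m then some c else some m

-- A's per-factor cost
def pvCostA (counts : List Int) (n f : Int) : Int :=
  (PySem.List.slice counts none (some f)).foldl
      (fun acc count => if count > PySem.Int.floordiv n f
                        then acc + (count - PySem.Int.floordiv n f) else acc) 0
    + (PySem.List.slice counts (some f) none).sum

-- B's per-factor cost
def pvCostB (n : Int) (counts prefixs : List Int) (g : Int) : Int :=
  let num := PySem.Int.floordiv n g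
  let top := min g.toNat counts.length
  let lo := pvBsearch counts num 0 top
  n - (num * (lo : Int) + (prefixs.getD top 0 - prefixs.getD lo 0))

-- running prefix sums starting at s
def pvPsums (s : Int) : List Int → List Int
  | [] => []
  | c :: t => (s + c) :: pvPsums (s + c) t

theorem pvPrefix_foldl (l : List Int) (p : List Int) (s : Int) :
    l.foldl (fun p c => p ++ [(PySem.List.pyGet? p (-1)).getD 0 + c]) (p ++ [s])
      = (p ++ [s]) ++ pvPsums s l := by
  induction l generalizing p s with
  | nil => simp [pvPsums]
  | cons c t ih =>
    simp only [List.foldl_cons, PySem.List.pyGet?_neg_one_append_singleton, Option.getD_some]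
    have h := ih (p ++ [s]) (s + c)
    rw [List.append_assoc] at h ⊢
    rw [h]
    simp [pvPsums]

theorem pvPsums_getD (s : Int) (l : List Int) (i : Nat) (h : i < l.length) :
    (pvPsums s l).getD i 0 = s + (l.take (i + 1)).sum := by
  induction l generalizing s i with
  | nil => simp at h
  | cons c t ih =>
    cases i with
    | zero => simp [pvPsums]
    | succ j =>
      simp only [pvPsums, List.getD_cons_succ, List.take_succ_cons, List.sum_cons]
      rw [ih (s + c) j (by simpa using h)]
      ring

theorem pvPrefix_getD (counts : List Int) (i : Nat) (h : i ≤ counts.length) :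
    ((counts.foldl (fun p c => p ++ [(PySem.List.pyGet? p (-1)).getD 0 + c]) [0]).getD i 0)
      = (counts.take i).sum := by
  have hp : counts.foldl (fun p c => p ++ [(PySem.List.pyGet? p (-1)).getD 0 + c]) [0]
      = [0] ++ pvPsums 0 counts := by
    have := pvPrefix_foldl counts [] 0
    simpa using this
  rw [hp]
  cases i with
  | zero => simp
  | succ j =>
    simp only [List.cons_append, List.nil_append, List.getD_cons_succ]
    rw [pvPsums_getD 0 counts j (by omega)]
    simp

theorem pvBsearch_spec (counts : List Int) (num : Int)
    (hsort : ∀ i j (hi : i < counts.length) (hj : j < counts.length), i ≤ j → counts[j] ≤ counts[i])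
    (lo hi : Nat) (hlohi : lo ≤ hi) (hhi : hi ≤ counts.length) :
    lo ≤ pvBsearch counts num lo hi ∧ pvBsearch counts num lo hi ≤ hi ∧
    (∀ i, lo ≤ i → i < pvBsearch counts num lo hi → num ≤ counts.getD i 0) ∧
    (∀ i, pvBsearch counts num lo hi ≤ i → i < hi → counts.getD i 0 < num) := by
  obtain ⟨k, hk⟩ : ∃ k, hi - lo ≤ k := ⟨_, le_refl _⟩
  induction k generalizing lo hi with
  | zero =>
    have hle : ¬ lo < hi := by omega
    rw [pvBsearch, dif_neg hle]
    exact ⟨le_refl _, by omega, fun i h1 h2 => absurd h2 (by omega),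
           fun i h1 h2 => absurd h2 (by omega)⟩
  | succ k ih =>
    by_cases hlt : lo < hi
    · have hmid1 : lo ≤ (lo + hi) / 2 := by omega
      have hmid2 : (lo + hi) / 2 < hi := by omega
      have hmlen : (lo + hi) / 2 < counts.length := by omega
      rw [pvBsearch, dif_pos hlt]
      by_cases hc : num ≤ counts.getD ((lo + hi) / 2) 0
      · rw [if_pos hc]
        have hrec := ih ((lo + hi) / 2 + 1) hi (by omega) hhi (by omega)
        obtain ⟨h1, h2, h3, h4⟩ := hrec
        refine ⟨by omega, h2, ?_, h4⟩
        intro i hi1 hi2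
        by_cases him : i ≤ (lo + hi) / 2
        · have hilen : i < counts.length := by omega
          have := hsort i ((lo + hi) / 2) hilen hmlen him
          rw [List.getD_eq_getElem _ _ hilen]
          rw [List.getD_eq_getElem _ _ hmlen] at hc
          omega
        · exact h3 i (by omega) hi2
      · rw [if_neg hc]
        have hrec := ih lo ((lo + hi) / 2) (by omega) (by omega) (by omega)
        obtain ⟨h1, h2, h3, h4⟩ := hrec
        refine ⟨h1, by omega, h3, ?_⟩
        intro i hi1 hi2
        by_cases him : i < (lo + hi) / 2
        · exact h4 i hi1 him
        · have hilen : i < counts.length := by omega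
          have := hsort ((lo + hi) / 2) i hmlen hilen (by omega)
          rw [List.getD_eq_getElem _ _ hilen]
          rw [List.getD_eq_getElem _ _ hmlen] at hc
          omega
    · rw [pvBsearch, dif_neg hlt]
      exact ⟨le_refl _, by omega, fun i h1 h2 => absurd h2 (by omega),
             fun i h1 h2 => absurd h2 (by omega)⟩

-- A's surplus loop over a list of elements all ≥ num
theorem pv_surplus_ge (num : Int) (l : List Int) (h : ∀ c ∈ l, num ≤ c) (a : Int) :
    l.foldl (fun acc c => if c > num then acc + (c - num) else acc) a
      = a + l.sum - num * l.length := by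
  induction l generalizing a with
  | nil => simp
  | cons c t ih =>
    have hc : num ≤ c := h c (by simp)
    simp only [List.foldl_cons, List.sum_cons, List.length_cons]
    rw [ih (fun x hx => h x (by simp [hx]))]
    by_cases hgt : c > num
    · rw [if_pos hgt]; push_cast; ring
    · rw [if_neg hgt]
      have : c = num := by omega
      subst this; push_cast; ring

-- A's surplus loop over a list of elements all < num does nothing
theorem pv_surplus_lt (num : Int) (l : List Int) (h : ∀ c ∈ l, c < num) (a : Int) :
    l.foldl (fun acc c => if c > num then acc + (c - num) else acc) a = a := by
  induction l generalizing a with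
  | nil => rfl
  | cons c t ih =>
    have hc : c < num := h c (by simp)
    simp only [List.foldl_cons, if_neg (by omega : ¬ c > num)]
    exact ih (fun x hx => h x (by simp [hx])) a

-- the counts of A/B sum to the length of the string
theorem pv_counts_sum (chars : List Char) :
    (PySem.List.sorted (PySem.Dict.counter chars : PySem.Dict Char Int).values
        (fun x => x) true).sum = (chars.length : Int) := by
  rw [(PySem.List.sorted_perm _ _ _).sum_eq]
  have hv : (PySem.Dict.counter chars : PySem.Dict Char Int).values
      = (PySem.Set.ofList chars).map (fun k => (chars.count k : Int)) := by
    show ((PySem.Dict.counter chars : PySem.Dict Char Int).items.map (·.2)) = _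
    rw [PySem.Dict.items_counter, List.map_map]; rfl
  rw [hv]
  have hperm : (PySem.Set.ofList chars : List Char).Perm chars.dedup := by
    refine (List.perm_ext_iff_of_nodup ?_ ?_).mpr ?_
    · exact PySem.Set.nodup_ofList chars
    · exact chars.nodup_dedup
    · intro a; simp [PySem.Set.mem_ofList, List.mem_dedup]
  rw [(hperm.map (fun k => (chars.count k : Int))).sum_eq]
  have : (chars.dedup.map (fun k => (chars.count k : Int)))
      = (chars.dedup.map (fun k => chars.count k)).map (fun m : Nat => (m : Int)) := by
    rw [List.map_map]; rfl
  rw [this, ← Nat.cast_list_sum, List.sum_map_count_dedup_eq_length]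

-- the two per-factor costs agree on sorted-descending counts summing to n
theorem pv_cost_eq (counts prefixs : List Int) (n g : Int)
    (hg : 1 ≤ g) (hsum : counts.sum = n)
    (hsort : ∀ i j (hi : i < counts.length) (hj : j < counts.length), i ≤ j → counts[j] ≤ counts[i])
    (hpre : prefixs = counts.foldl (fun p c => p ++ [(PySem.List.pyGet? p (-1)).getD 0 + c]) [0]) :
    pvCostB n counts prefixs g = pvCostA counts n g := by
  have hg0 : (0 : Int) ≤ g := by omega
  unfold pvCostA pvCostB
  rw [PySem.List.slice_to counts hg0, PySem.List.slice_from counts hg0]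
  set num := PySem.Int.floordiv n g with hnum
  set top := min g.toNat counts.length with htop
  set r := pvBsearch counts num 0 top with hr
  show n - (num * (r : Int) + (prefixs.getD top 0 - prefixs.getD r 0)) = _
  have htople : top ≤ counts.length := by omega
  obtain ⟨-, hrtop, hge, hlt⟩ :=
    pvBsearch_spec counts num hsort 0 top (by omega) htople
  have htake : counts.take g.toNat = counts.take top := by
    rw [List.take_eq_take_iff]; omega
  -- split the surplus fold at r
  have hsplit : counts.take top = counts.take r ++ ((counts.take top).drop r) := by
    have : counts.take r = (counts.take top).take r := by
      rw [List.take_take]; congr 1; omega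
    rw [this, List.take_append_drop]
  have hlen_take_r : (counts.take r).length = r := by
    rw [List.length_take]; omega
  have hlen_drop : ((counts.take top).drop r).length = top - r := by
    rw [List.length_drop, List.length_take]; omega
  have hsurplus :
      (counts.take g.toNat).foldl
          (fun acc count => if count > num then acc + (count - num) else acc) 0
        = (counts.take r).sum - num * r := by
    rw [htake, hsplit, List.foldl_append]
    rw [pv_surplus_ge num (counts.take r) ?_ 0]
    · rw [pv_surplus_lt num ((counts.take top).drop r) ?_]
      · rw [hlen_take_r]; ring
      · intro c hc
        obtain ⟨i, hilen, hieq⟩ := List.mem_iff_getElem.mp hc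
        rw [List.getElem_drop] at hieq
        have hi2 : r + i < top := by omega
        have := hlt (r + i) (by omega) hi2
        rw [List.getD_eq_getElem _ _ (by omega)] at this
        rw [List.getElem_take] at hieq
        omega
    · intro c hc
      obtain ⟨i, hilen, hieq⟩ := List.mem_iff_getElem.mp hc
      rw [hlen_take_r] at hilen
      have := hge i (by omega) hilen
      rw [List.getD_eq_getElem _ _ (by omega)] at this
      rw [List.getElem_take] at hieq
      omega
  have hdropsum : (counts.drop g.toNat).sum = n - (counts.take top).sum := by
    have h1 : (counts.take g.toNat).sum + (counts.drop g.toNat).sum = counts.sum :=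
      List.sum_take_add_sum_drop counts g.toNat
    rw [htake] at h1; omega
  have hp1 : prefixs.getD top 0 = (counts.take top).sum := by
    rw [hpre]; exact pvPrefix_getD counts top htople
  have hp2 : prefixs.getD r 0 = (counts.take r).sum := by
    rw [hpre]; exact pvPrefix_getD counts r (by omega)
  rw [hsurplus, hdropsum, hp1, hp2]
  ring

-- B's while-loop equals a fold of pvMStep over the per-divisor costs
theorem pvLoopB_eq (n : Int) (counts prefixs : List Int) (f : Nat) (hf : 1 ≤ f)
    (best : Option Int) :
    pvLoopB n counts prefixs f best
      = (((PySem.List.pyRange (f : Int) 27 1).filter (fun i => PySem.Int.mod n i == 0)).map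
          (pvCostB n counts prefixs)).foldl pvMStep best := by
  obtain ⟨k, hk⟩ : ∃ k, 27 - f = k := ⟨_, rfl⟩
  induction k generalizing f best with
  | zero =>
    have h27 : ¬ f ≤ 26 := by omega
    rw [pvLoopB, if_neg h27]
    have : PySem.List.pyRange (f : Int) 27 1 = [] := by
      rw [PySem.List.pyRange_one]
      have : ((27 : Int) - f).toNat = 0 := by omega
      rw [this]; rfl
    rw [this]; rfl
  | succ k ih =>
    by_cases h26 : f ≤ 26
    · rw [pvLoopB, if_pos h26]
      have hcons : PySem.List.pyRange (f : Int) 27 1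
          = (f : Int) :: PySem.List.pyRange ((f : Int) + 1) 27 1 :=
        PySem.List.pyRange_one_cons (by omega)
      have hcast : ((f : Int) + 1) = ((f + 1 : Nat) : Int) := by push_cast; ring
      rw [hcons, hcast, List.filter_cons]
      by_cases hdiv : PySem.Int.mod n (f : Int) == 0
      · rw [if_pos (by simpa using hdiv)]
        simp only [hdiv, if_pos]
        rw [List.map_cons, List.foldl_cons]
        rw [ih (f + 1) (by omega) _ (by omega)]
        congr 1
      · rw [if_neg (by simpa using hdiv)]
        simp only [hdiv]
        rw [ih (f + 1) (by omega) _ (by omega)]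
        simp
    · omega

-- ===== VERDICT (by name: the statement is the Claim_ definition above) =====
theorem minimum_op_to_be_balanced_spec : Claim_equal_minimum_op_to_be_balanced := by
  intro string _
  unfold Spec_minimum_op_to_be_balanced
  set chars := string.toList with hchars
  have hn : PySem.Str.len string = (chars.length : Int) := rfl
  set n : Int := PySem.Str.len string with hnn
  set counts : List Int :=
    PySem.List.sorted
      (chars.foldl (fun d letter => d.insert letter (d.getD letter 0 + 1)) PySem.Dict.empty).values
      (fun x => x) true with hcounts
  set prefixs : List Int :=
    counts.foldl (fun p c => p ++ [(PySem.List.pyGet? p (-1)).getD 0 + c]) [0] with hpre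
  have hsum : counts.sum = n := by
    rw [hcounts, hn, PySem.Dict.foldl_insert_getD_add_one_eq_counter]
    exact pv_counts_sum chars
  have hsort : ∀ i j (hi : i < counts.length) (hj : j < counts.length),
      i ≤ j → counts[j] ≤ counts[i] := by
    have hpw : counts.Pairwise (fun a b => b ≤ a) := by
      rw [hcounts]
      exact PySem.List.sorted_pairwise_rev _ _
    intro i j hi hj hij
    rcases Nat.lt_or_ge i j with h | h
    · exact (List.pairwise_iff_getElem.mp hpw) i j hi hj h
    · have : i = j := by omega
      subst this; exact le_refl _
  set fs : List Int := (PySem.List.pyRange 1 27 1).filter (fun i => PySem.Int.mod n i == 0)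
    with hfs
  have hA : minimum_op_to_be_balanced string
      = ((fs.map (fun f => pvCostA counts n f)).foldl pvMStep none).getD 0 := by
    show (((get_factors_less_than_26 n).foldl _ none).getD 0 : Int) = _
    rw [List.foldl_map]; rfl
  have hB : minimum_op_to_be_balanced_alt string
      = (pvLoopB n counts prefixs 1 none).getD 0 := rfl
  rw [hA, hB, pvLoopB_eq n counts prefixs 1 (le_refl 1) none]
  have hone : ((1 : Nat) : Int) = (1 : Int) := rfl
  rw [hone]
  congr 2
  refine (List.map_congr_left ?_).symm
  intro g hg
  have h1 : 1 ≤ g := by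
    rw [hfs] at hg
    have := (List.mem_filter.mp hg).1
    rw [PySem.List.mem_pyRange_one] at this
    omega
  exact pv_cost_eq counts prefixs n g h1 hsum hsort hpre
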